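-- pv_equiv track=rewrite | github.com/chriso/arm64-go | gen/gen.py | predicate
-- ===== SOURCE A (Python) =====
-- def predicate(name: str, value: str):
--     op = "=="
--     value = value
--     if value.startswith("!= "):
--         value = value[3:]
--         op = "!="
--
--     if len(set(value) - {"1", "0", "x"}) > 0:
--         raise RuntimeError(f"value has unexpected chars: {value}")
--
--     mask = 0
--     match = 0
--     for i, c in enumerate(reversed(value)):
--         if c == "x":
--             continue
--         mask += 1 << i
--         match += int(c) << i
--
--     if "x" not in value:
--         return f"{name} {op} {hex(match)}"
--     return f"({name} & {hex(mask)}) {op} {hex(match)}"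
-- ===== SOURCE B (Python) =====
-- def predicate(name: str, value: str):
--     op = "=="
--     if value.startswith("!= "):
--         value = value[3:]
--         op = "!="
--
--     if set(value) - {"1", "0", "x"}:
--         raise RuntimeError(f"value has unexpected chars: {value}")
--
--     # Stage 1: rewrite the pattern into two plain binary strings.
--     match_str = value.translate(str.maketrans("x", "0"))
--     mask_str = value.translate(str.maketrans("10x", "110"))
--     # Stage 2: one base-2 parse each (int('', 2) would raise, so guard the empty string).
--     match = int(match_str, 2) if match_str else 0
--     mask = int(mask_str, 2) if mask_str else 0
--
--     if "x" not in value: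
--         return f"{name} {op} {hex(match)}"
--     return f"({name} & {hex(mask)}) {op} {hex(match)}"
-- ===== Notes on version B (the rewrite author's own statement) =====
-- stated objective: simpler
-- what changed: Replaces A's reversed-enumerate loop that accumulates mask/match with per-bit shifts by two staged passes: rewrite the pattern into plain binary strings with str.translate ('x'->'0' for match, '1'/'0'->'1','x'->'0' for mask) and convert each with a single int(s, 2) parse (guarding the empty string).
import Mathlib
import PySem

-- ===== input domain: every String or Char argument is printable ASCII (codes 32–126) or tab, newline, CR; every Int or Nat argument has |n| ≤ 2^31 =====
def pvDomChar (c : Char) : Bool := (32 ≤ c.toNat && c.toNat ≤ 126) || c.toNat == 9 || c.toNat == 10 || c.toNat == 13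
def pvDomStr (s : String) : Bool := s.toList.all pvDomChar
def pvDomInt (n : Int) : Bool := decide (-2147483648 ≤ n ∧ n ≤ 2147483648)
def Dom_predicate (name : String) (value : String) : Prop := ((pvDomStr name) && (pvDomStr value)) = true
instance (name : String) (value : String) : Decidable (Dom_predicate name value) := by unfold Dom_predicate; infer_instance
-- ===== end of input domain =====

-- B replaces A's per-bit shift loop by string rewriting (translate) plus a single base-2 parse per number (simpler; return-value equivalence only).

-- shared output-formatting helper: Python's hex(n) for n ≥ 0 (both programs only call it on nonnegative values)
def hexDigitChar (n : Nat) : Char := if n < 10 then Char.ofNat (48 + n) else Char.ofNat (87 + n)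

def hexChars (n : Nat) : List Char :=
  if h : n = 0 then [] else hexChars (n / 16) ++ [hexDigitChar (n % 16)]
decreasing_by exact Nat.div_lt_self (Nat.pos_of_ne_zero h) (by norm_num)

def pyHex (n : Int) : String :=
  String.ofList ('0' :: 'x' :: (if n = 0 then ['0'] else hexChars n.toNat))

-- ===== PORT A =====
def predicate (name : String) (value : String) : String :=
  let op : String := "=="
  let p := if PySem.Str.startswith value "!= " then (PySem.Str.slice value (some 3) none, "!=")
           else (value, op)
  let value := p.1
  let op := p.2
  -- (the RuntimeError on chars outside {0,1,x} is excluded by Pre_predicate)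
  -- for i, c in enumerate(reversed(value)): shift indices are the enumerate indices, always ≥ 0, so .toNat is exact
  let loop := (PySem.List.enumerate value.toList.reverse 0).foldl
      (fun (st : Int × Int) (ic : Int × Char) =>
        if ic.2 == 'x' then st
        else (st.1 + (1 : Int) <<< ic.1.toNat, st.2 + (if ic.2 == '1' then (1 : Int) else 0) <<< ic.1.toNat))
      ((0 : Int), (0 : Int))
  if ¬ PySem.Str.isIn "x" value then
    name ++ " " ++ op ++ " " ++ pyHex loop.2
  else
    "(" ++ name ++ " & " ++ pyHex loop.1 ++ ") " ++ op ++ " " ++ pyHex loop.2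

-- ===== PORT B =====
-- hand port of Python's int(s, 2) for a string of binary digits: exact on the nonempty
-- all-'0'/'1' strings B passes it (Source B guards the empty string itself, and no sign /
-- whitespace / '0b' prefix / '_' case can arise from its translate step)
def binDigit (c : Char) : Int := (c.toNat : Int) - 48

def parseBin (l : List Char) : Int := l.foldl (fun a c => a * 2 + binDigit c) 0

def predicate_alt (name : String) (value : String) : String :=
  let op : String := "=="
  let p := if PySem.Str.startswith value "!= " then (PySem.Str.slice value (some 3) none, "!=")
           else (value, op)
  let value := p.1
  let op := p.2
  -- value.translate(str.maketrans("x", "0")) : 'x' -> '0', all other chars unchanged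
  let matchStr := value.toList.map (fun c => if c == 'x' then '0' else c)
  -- value.translate(str.maketrans("10x", "110")) : '1' -> '1', '0' -> '1', 'x' -> '0'
  let maskStr := value.toList.map
      (fun c => if c == '1' then '1' else if c == '0' then '1' else if c == 'x' then '0' else c)
  let mtch := if matchStr = [] then (0 : Int) else parseBin matchStr
  let msk := if maskStr = [] then (0 : Int) else parseBin maskStr
  if ¬ PySem.Str.isIn "x" value then
    name ++ " " ++ op ++ " " ++ pyHex mtch
  else
    "(" ++ name ++ " & " ++ pyHex msk ++ ") " ++ op ++ " " ++ pyHex mtch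

-- ===== PRECONDITION & SPEC =====
-- Pre_ excludes exactly the inputs where A raises RuntimeError: a character outside {0,1,x}
-- in the value (after stripping an optional "!= " prefix).
def Pre_predicate (name : String) (value : String) : Prop :=
  ((if PySem.Str.startswith value "!= " then value.toList.drop 3 else value.toList).all
    (fun c => c == '0' || c == '1' || c == 'x')) = true
instance (name : String) (value : String) : Decidable (Pre_predicate name value) := by
  unfold Pre_predicate; infer_instance

def pvWitness_predicate : String × String := ("a", "1x0")

def Spec_predicate (name : String) (value : String) (out : String) : Prop := out = predicate_alt name value
instance (name : String) (value : String) (out : String) : Decidable (Spec_predicate name value out) := by unfold Spec_predicate; infer_instance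

-- ===== CLAIM (what is proved, stated in full; the proofs are below) =====
def Claim_equal_predicate : Prop := ∀ (name : String) (value : String), Dom_predicate name value → Pre_predicate name value → Spec_predicate name value (predicate name value)

-- ===== LEMMAS AND PROOFS =====

def contrib (β : Char → Int) (c : Char) : Int := if c == 'x' then 0 else β c

-- little-endian value of A's accumulation over a list of chars
def aval (β : Char → Int) : List Char → Int
  | [] => 0
  | c :: r => contrib β c + 2 * aval β r

-- big-endian Horner value
def hval (β : Char → Int) (l : List Char) : Int :=
  l.foldl (fun acc c => acc * 2 + β c) 0

-- one component of A's loop body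
def fAux (β : Char → Int) (a : Int) (ic : Int × Char) : Int :=
  if ic.2 == 'x' then a else a + (β ic.2) <<< ic.1.toNat

lemma splitA (zs : List (Int × Char)) (a b : Int) :
    zs.foldl (fun (st : Int × Int) (ic : Int × Char) =>
        if ic.2 == 'x' then st
        else (st.1 + (1 : Int) <<< ic.1.toNat, st.2 + (if ic.2 == '1' then (1 : Int) else 0) <<< ic.1.toNat))
      (a, b)
    = (zs.foldl (fAux fun _ => 1) a, zs.foldl (fAux fun c => if c == '1' then (1 : Int) else 0) b) := by
  induction zs generalizing a b with
  | nil => rfl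
  | cons ic t ih =>
    by_cases h : ic.2 == 'x' <;>
      simp only [List.foldl_cons, fAux, h, if_true, if_false, Bool.false_eq_true] <;>
      exact ih _ _

lemma foldA_enum (β : Char → Int) (xs : List Char) (s : Nat) (a : Int) :
    (PySem.List.enumerate xs (s : Int)).foldl (fAux β) a = a + 2 ^ s * aval β xs := by
  induction xs generalizing s a with
  | nil => simp [PySem.List.enumerate_nil, aval]
  | cons c t ih =>
    rw [PySem.List.enumerate_cons, List.foldl_cons]
    have hs1 : (s : Int) + 1 = ((s + 1 : Nat) : Int) := by push_cast; ring
    rw [hs1, ih]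
    by_cases h : c == 'x'
    · simp only [fAux, h, if_true, aval, contrib]
      ring
    · have hsh : (β c) <<< (((s : Nat) : Int).toNat) = β c * 2 ^ s := by
        simp [Int.shiftLeft_eq]
      simp only [fAux, h, Bool.false_eq_true, if_false, aval, contrib, hsh]
      ring

lemma foldA_enum0 (β : Char → Int) (xs : List Char) (a : Int) :
    (PySem.List.enumerate xs 0).foldl (fAux β) a = a + aval β xs := by
  have h := foldA_enum β xs 0 a
  simpa using h

lemma foldB_shift (β : Char → Int) (l : List Char) (a : Int) :
    l.foldl (fun acc c => acc * 2 + β c) a = a * 2 ^ l.length + hval β l := by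
  induction l generalizing a with
  | nil => simp [hval]
  | cons c t ih =>
    rw [List.foldl_cons, ih]
    have h0 : hval β (c :: t) = (0 * 2 + β c) * 2 ^ t.length + hval β t := by
      show t.foldl (fun acc c => acc * 2 + β c) (0 * 2 + β c) = _
      exact ih _
    rw [List.length_cons, h0]
    ring

lemma hval_cons (β : Char → Int) (c : Char) (t : List Char) :
    hval β (c :: t) = β c * 2 ^ t.length + hval β t := by
  have h : hval β (c :: t) = (0 * 2 + β c) * 2 ^ t.length + hval β t := by
    show t.foldl (fun acc c => acc * 2 + β c) (0 * 2 + β c) = _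
    exact foldB_shift β t _
  rw [h]
  ring

lemma aval_append (β : Char → Int) (xs : List Char) (c : Char) :
    aval β (xs ++ [c]) = aval β xs + 2 ^ xs.length * contrib β c := by
  induction xs with
  | nil => simp [aval]
  | cons d t ih => simp only [List.cons_append, aval, ih, List.length_cons]; ring

lemma aval_rev (β : Char → Int) (l : List Char) :
    aval β l.reverse = hval (contrib β) l := by
  induction l with
  | nil => rfl
  | cons c t ih =>
    rw [List.reverse_cons, aval_append, ih, List.length_reverse, hval_cons]
    ring

lemma parseBin_map (f : Char → Char) (l : List Char) :
    parseBin (l.map f) = l.foldl (fun a c => a * 2 + binDigit (f c)) 0 := by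
  simp [parseBin, List.foldl_map]

lemma guard_parseBin (l : List Char) :
    (if l = [] then (0 : Int) else parseBin l) = parseBin l := by
  by_cases h : l = [] <;> simp [h, parseBin]

-- on the validated alphabet the translated digits reproduce A's per-bit contributions
lemma mask_eq (v : List Char)
    (h : v.all (fun c => c == '0' || c == '1' || c == 'x') = true) :
    parseBin (v.map
      (fun c => if c == '1' then '1' else if c == '0' then '1' else if c == 'x' then '0' else c))
    = hval (contrib fun _ => 1) v := by
  rw [parseBin_map]
  unfold hval
  apply PySem.List.foldl_congr_mem
  intro a c hc
  have hm := List.all_eq_true.mp h c hc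
  simp only [beq_iff_eq, Bool.or_eq_true] at hm
  rcases hm with (h0 | h1) | hx
  · subst h0; simp [binDigit, contrib]
  · subst h1; simp [binDigit, contrib]
  · subst hx; simp [binDigit, contrib]

lemma match_eq (v : List Char)
    (h : v.all (fun c => c == '0' || c == '1' || c == 'x') = true) :
    parseBin (v.map (fun c => if c == 'x' then '0' else c))
    = hval (contrib fun c => if c == '1' then (1 : Int) else 0) v := by
  rw [parseBin_map]
  unfold hval
  apply PySem.List.foldl_congr_mem
  intro a c hc
  have hm := List.all_eq_true.mp h c hc
  simp only [beq_iff_eq, Bool.or_eq_true] at hm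
  rcases hm with (h0 | h1) | hx
  · subst h0; simp [binDigit, contrib]
  · subst h1; simp [binDigit, contrib]
  · subst hx; simp [binDigit, contrib]

-- A's reversed-enumerate loop produces exactly B's two parsed numbers
lemma loops_eq (v : List Char)
    (h : v.all (fun c => c == '0' || c == '1' || c == 'x') = true) :
    (PySem.List.enumerate v.reverse 0).foldl
      (fun (st : Int × Int) (ic : Int × Char) =>
        if ic.2 == 'x' then st
        else (st.1 + (1 : Int) <<< ic.1.toNat, st.2 + (if ic.2 == '1' then (1 : Int) else 0) <<< ic.1.toNat))
      ((0 : Int), (0 : Int))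
    = ((if v.map
            (fun c => if c == '1' then '1' else if c == '0' then '1' else if c == 'x' then '0' else c) = []
        then (0 : Int)
        else parseBin (v.map
            (fun c => if c == '1' then '1' else if c == '0' then '1' else if c == 'x' then '0' else c))),
       (if v.map (fun c => if c == 'x' then '0' else c) = [] then (0 : Int)
        else parseBin (v.map (fun c => if c == 'x' then '0' else c)))) := by
  rw [splitA, foldA_enum0, foldA_enum0, aval_rev, aval_rev, guard_parseBin, guard_parseBin,
    mask_eq v h, match_eq v h]
  simp

-- ===== VERDICT (by name: the statement is the Claim_ definition above) =====
theorem predicate_spec : Claim_equal_predicate := by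
  intro name value _ hpre
  unfold Pre_predicate at hpre
  unfold Spec_predicate predicate predicate_alt
  by_cases hs : PySem.Str.startswith value "!= " = true
  · have hv : (PySem.Str.slice value (some 3) none).toList = value.toList.drop 3 := by
      simp [pysem]
    simp only [hs, if_true] at hpre ⊢
    rw [hv, loops_eq _ hpre]
  · simp only [hs, Bool.false_eq_true, if_false] at hpre ⊢
    rw [loops_eq _ hpre]
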